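-- pv_equiv track=rewrite | github.com/Bradford-RenduchintalaCentreForSpaceAI/Spintern_Channel_Emulator | Scripts/Mary_ASK.py | Int_generator
-- ===== SOURCE A (Python) =====
-- def Int_generator(bits,Levels):
--
--     #Split the bits into levels
--     int_list = []
--     int_value = 0
--     for i in range(0,round(len(bits)/Levels)):
--         for q in range(0,Levels):
--
--             if i*Levels+q >= len(bits):
--                 break
--             int_value += bits[i*Levels+q]*2**q
--         int_list.append(int_value)
--         int_value = 0
--     return int_list
-- ===== SOURCE B (Python) =====
-- def Int_generator(bits, Levels):
--     num_chunks = round(len(bits) / Levels)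
--     if num_chunks <= 0:
--         return []
--     limit = num_chunks * Levels
--     out = [0] * num_chunks
--     for idx, b in enumerate(bits):
--         if idx < limit:
--             out[idx // Levels] += b << (idx % Levels)
--     return out
-- ===== Notes on version B (the rewrite author's own statement) =====
-- stated objective: faster
-- what changed: B makes a single pass over the bits, scattering each bit's contribution b << (idx % Levels) into a preallocated result list at position idx // Levels, instead of A's nested chunk/bit loops that recompute a fresh bignum power 2**q for every bit.
import Mathlib
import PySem

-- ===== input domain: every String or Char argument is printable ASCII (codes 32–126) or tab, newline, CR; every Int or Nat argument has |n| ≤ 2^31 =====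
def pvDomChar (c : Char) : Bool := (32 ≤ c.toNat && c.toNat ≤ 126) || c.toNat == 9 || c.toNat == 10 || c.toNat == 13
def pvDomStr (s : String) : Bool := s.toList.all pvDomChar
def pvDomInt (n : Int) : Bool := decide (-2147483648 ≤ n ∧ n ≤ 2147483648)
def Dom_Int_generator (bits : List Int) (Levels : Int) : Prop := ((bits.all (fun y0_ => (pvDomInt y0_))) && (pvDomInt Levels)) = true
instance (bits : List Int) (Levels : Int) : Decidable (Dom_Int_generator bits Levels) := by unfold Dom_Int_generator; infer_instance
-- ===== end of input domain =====

-- B replaces A's nested chunk/bit loops by a single pass over the bits that scatters each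
-- bit's contribution into a preallocated result list (no 2**q power recomputed per bit); objective: faster (measured).

-- Shared helper: Python round(n / L) for integers n, L (L ≠ 0), computed exactly on the
-- rational n/L with banker's rounding; exact wherever the double n/L is correctly rounded,
-- which holds throughout Dom (|values| ≤ 2^31 ≪ 2^52).
def pvRoundDiv (n L : Int) : Int :=
  if 2 * (n - PySem.Int.floordiv n L * L) = L then
    (if PySem.Int.floordiv n L % 2 = 0 then PySem.Int.floordiv n L else PySem.Int.floordiv n L + 1)
  else if (0 < L ∧ L < 2 * (n - PySem.Int.floordiv n L * L)) ∨ (L < 0 ∧ 2 * (n - PySem.Int.floordiv n L * L) < L) then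
    PySem.Int.floordiv n L + 1
  else PySem.Int.floordiv n L

-- ===== PORT A =====
-- inner loop of A: for q in range(0, Levels): if i*Levels+q >= len(bits): break; int_value += bits[i*Levels+q]*2**q
-- (the index is provably in range whenever read, so the default of pyGetD is never used)
def IgInner (bits : List Int) (base : Int) (qs : List Int) (acc : Int) : Int :=
  match qs with
  | [] => acc
  | q :: rest =>
    if (bits.length : Int) ≤ base + q then acc
    else IgInner bits base rest (acc + (PySem.List.pyGetD bits (base + q) 0) * 2 ^ q.toNat)

def Int_generator (bits : List Int) (Levels : Int) : List Int :=
  (PySem.List.pyRange 0 (pvRoundDiv (bits.length : Int) Levels) 1).foldl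
    (fun int_list i => int_list ++ [IgInner bits (i * Levels) (PySem.List.pyRange 0 Levels 1) 0]) []

-- ===== PORT B =====
-- single pass: out[idx // Levels] += b << (idx % Levels); Python's << on ints is exactly
-- multiplication by 2^shift; the written index is provably in range (see scatter_inv), so
-- List.set is exact for Python's out[j] += …
def Int_generator_alt (bits : List Int) (Levels : Int) : List Int :=
  let num_chunks := pvRoundDiv (bits.length : Int) Levels
  if num_chunks ≤ 0 then []
  else
    let limit := num_chunks * Levels
    (PySem.List.enumerate bits).foldl
      (fun out p =>
        if p.1 < limit then
          out.set (PySem.Int.floordiv p.1 Levels).toNat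
            (out.getD (PySem.Int.floordiv p.1 Levels).toNat 0 + p.2 * 2 ^ (PySem.Int.mod p.1 Levels).toNat)
        else out)
      (List.replicate num_chunks.toNat 0)

-- ===== PRECONDITION & SPEC =====
-- Levels = 0 makes Python's round(len(bits)/Levels) raise ZeroDivisionError; excluded.
def Pre_Int_generator (bits : List Int) (Levels : Int) : Prop := Levels ≠ 0
instance (bits : List Int) (Levels : Int) : Decidable (Pre_Int_generator bits Levels) := by unfold Pre_Int_generator; infer_instance
def pvWitness_Int_generator : List Int × Int := ([1, 0, 1, 1, 0], 2)

def Spec_Int_generator (bits : List Int) (Levels : Int) (out : List Int) : Prop := out = Int_generator_alt bits Levels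
instance (bits : List Int) (Levels : Int) (out : List Int) : Decidable (Spec_Int_generator bits Levels out) := by unfold Spec_Int_generator; infer_instance

-- ===== CLAIM (what is proved, stated in full; the proofs are below) =====
def Claim_equal_Int_generator : Prop := ∀ (bits : List Int) (Levels : Int), Dom_Int_generator bits Levels → Pre_Int_generator bits Levels → Spec_Int_generator bits Levels (Int_generator bits Levels)

-- ===== LEMMAS AND PROOFS =====

-- value of a chunk, least-significant bit first
def lsbVal : List Int → Int
  | [] => 0
  | a :: c => a + 2 * lsbVal c

-- the common normal form both ports are reduced to
def chunksOf (bits : List Int) (l N : Nat) : List Int :=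
  (List.range N).map (fun j => lsbVal ((bits.drop (j * l)).take l))

theorem lsbVal_append_singleton (c : List Int) (b : Int) :
    lsbVal (c ++ [b]) = lsbVal c + 2 ^ c.length * b := by
  induction c with
  | nil => simp [lsbVal]
  | cons a c ih => simp [lsbVal, ih]; ring

theorem IgInner_append_last (bits : List Int) (base q0 : Int) (qs : List Int) (acc : Int)
    (h : ∀ x ∈ qs, x ≤ q0) :
    IgInner bits base (qs ++ [q0]) acc =
      if (bits.length : Int) ≤ base + q0 then IgInner bits base qs acc
      else IgInner bits base qs acc + (PySem.List.pyGetD bits (base + q0) 0) * 2 ^ q0.toNat := by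
  induction qs generalizing acc with
  | nil => simp [IgInner]
  | cons x rest ih =>
    have hx : x ≤ q0 := h x (by simp)
    by_cases hbrk : (bits.length : Int) ≤ base + x
    · have h0 : (bits.length : Int) ≤ base + q0 := by omega
      simp [IgInner, hbrk, h0]
    · simp only [List.cons_append, IgInner, if_neg hbrk]
      exact ih _ (fun y hy => h y (by simp [hy]))

theorem chunk_eq (bits : List Int) (base : Int) (hbase : 0 ≤ base) (k : Nat) :
    IgInner bits base (PySem.List.pyRange 0 (k : Int) 1) 0 =
      lsbVal (PySem.List.slice bits (some base) (some (base + (k : Int)))) := by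
  have hslice : ∀ c : Int, 0 ≤ c →
      PySem.List.slice bits (some base) (some (base + c)) =
        (bits.drop base.toNat).take c.toNat := by
    intro c hc
    rw [PySem.List.slice_toNat bits hbase (by omega)]
    congr 1
    omega
  induction k with
  | zero =>
    simp only [Nat.cast_zero, add_zero]
    rw [PySem.List.pyRange_one_eq_nil (le_refl 0), PySem.List.slice_toNat bits hbase hbase]
    simp [IgInner, lsbVal]
  | succ k ih =>
    rw [show ((k + 1 : Nat) : Int) = (k : Int) + 1 by push_cast; ring,
        PySem.List.pyRange_one_succ_right (by omega : (0:Int) ≤ (k:Int))]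
    rw [IgInner_append_last bits base (k : Int) _ 0
        (fun x hx => by
          have := (PySem.List.mem_pyRange_one).1 hx
          omega)]
    rw [hslice (k : Int) (by omega)] at ih
    rw [show base + ((k : Int) + 1) = base + (((k : Int) + 1)) by ring,
        hslice ((k : Int) + 1) (by omega), ih]
    have htn : ((k : Int)).toNat = k := by omega
    have htn1 : ((k : Int) + 1).toNat = k + 1 := by omega
    rw [htn, htn1]
    by_cases hbrk : (bits.length : Int) ≤ base + (k : Int)
    · rw [if_pos hbrk]
      have hlen : (bits.drop base.toNat).length ≤ k := by
        simp [List.length_drop]; omega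
      rw [List.take_of_length_le hlen, List.take_of_length_le (by omega)]
    · rw [if_neg hbrk]
      have hk : k < (bits.drop base.toNat).length := by
        simp [List.length_drop]; omega
      rw [List.take_add_one]
      rw [List.getElem?_eq_getElem hk]
      simp only [Option.toList_some]
      rw [lsbVal_append_singleton]
      have hgd : PySem.List.pyGetD bits (base + (k : Int)) 0 = (bits.drop base.toNat)[k] := by
        have h2 : (base + (k : Int)).toNat = base.toNat + k := by omega
        rw [PySem.List.pyGetD_of_nonneg (i := base + (k : Int)) (h := by omega), h2]
        have h3 : (List.drop base.toNat bits)[k] = bits[base.toNat + k]'(by omega) :=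
          List.getElem_drop ..
        rw [h3, List.getD_eq_getElem _ _ (by omega)]
      rw [hgd]
      have hlt : (List.take k (bits.drop base.toNat)).length = k := by
        simp [List.length_take]; omega
      rw [hlt]
      ring

theorem roundDiv_nonpos (n L : Int) (hn : 0 ≤ n) (hL : L < 0) : pvRoundDiv n L ≤ 0 := by
  unfold pvRoundDiv
  set q := PySem.Int.floordiv n L with hq
  have hqq : q = PySem.Int.floordiv (-n) (-L) := by
    rw [hq, ← PySem.Int.floordiv_neg_neg]
  have hbr := (PySem.Int.floordiv_eq_iff_of_pos (a := -n) (b := -L) (q := q)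
      (by omega)).1 hqq.symm
  obtain ⟨h1, h2⟩ := hbr
  have hql : n ≤ q * L := by nlinarith
  have hq1l : (q + 1) * L < n := by nlinarith
  have hqle : q ≤ 0 := by nlinarith
  split_ifs with htie hodd hup
  · exact hqle
  · have hr : 2 * (n - q * L) = L := htie
    have : n < q * L := by omega
    nlinarith
  · rcases hup with ⟨h3, _⟩ | ⟨_, h4⟩
    · omega
    · have : n < q * L := by omega
      nlinarith
  · exact hqle

theorem roundDiv_nonneg (n L : Int) (hn : 0 ≤ n) (hL : 0 < L) : 0 ≤ pvRoundDiv n L := by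
  unfold pvRoundDiv
  set q := PySem.Int.floordiv n L with hq
  have hbr := (PySem.Int.floordiv_eq_iff_of_pos (a := n) (b := L) (q := q) hL).1 hq.symm
  obtain ⟨h1, h2⟩ := hbr
  have hq0 : 0 ≤ q := by nlinarith
  split_ifs <;> omega

-- A's output is chunksOf
theorem A_eq_chunks (bits : List Int) (L : Int) (hL : 0 < L) :
    Int_generator bits L = chunksOf bits L.toNat (pvRoundDiv (bits.length : Int) L).toNat := by
  unfold Int_generator chunksOf
  rw [PySem.List.foldl_append_singleton_eq_map, List.nil_append]
  apply List.ext_getElem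
  · simp [PySem.List.length_pyRange_one]
  · intro k h1 h2
    rw [List.getElem_map, List.getElem_map, PySem.List.getElem_pyRange_one, List.getElem_range]
    rw [zero_add]
    have hbase : (0:Int) ≤ (k : Int) * L := by positivity
    have hLk : ((L.toNat : Nat) : Int) = L := by omega
    have key := chunk_eq bits ((k : Int) * L) hbase L.toNat
    rw [hLk] at key
    rw [key, PySem.List.slice_toNat bits hbase (by omega)]
    have hc1 : ((k : Int) * L).toNat = k * L.toNat := by
      have h : (k : Int) * L = ((k * L.toNat : Nat) : Int) := by push_cast; rw [hLk]
      rw [h, Int.toNat_natCast]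
    have hc2 : ((k : Int) * L + L).toNat = k * L.toNat + L.toNat := by
      have h : (k : Int) * L + L = ((k * L.toNat + L.toNat : Nat) : Int) := by push_cast; rw [hLk]
      rw [h, Int.toNat_natCast]
    rw [hc1, hc2]
    congr 2
    omega

-- the scatter invariant for B: after scattering the first m bits, slot j holds the
-- lsb-value of chunk j of the processed prefix
theorem scatter_inv (bits : List Int) (L NC : Int) (hL : 0 < L)
    (m : Nat) (hm : m ≤ bits.length) :
    (PySem.List.enumerate (bits.take m)).foldl
      (fun out p =>
        if p.1 < NC * L then
          out.set (PySem.Int.floordiv p.1 L).toNat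
            (out.getD (PySem.Int.floordiv p.1 L).toNat 0 + p.2 * 2 ^ (PySem.Int.mod p.1 L).toNat)
        else out)
      (List.replicate NC.toNat 0)
    = (List.range NC.toNat).map
        (fun j => lsbVal (((bits.take m).drop (j * L.toNat)).take L.toNat)) := by
  induction m with
  | zero =>
    rw [List.take_zero, PySem.List.enumerate_nil, List.foldl_nil]
    apply List.ext_getElem
    · simp
    · intro k h1 h2
      simp [lsbVal]
  | succ m ih =>
    have hmlt : m < bits.length := by omega
    have htake : bits.take (m + 1) = bits.take m ++ [bits[m]] := by
      rw [List.take_add_one, List.getElem?_eq_getElem hmlt]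
      simp
    rw [htake, PySem.List.enumerate_append, List.foldl_append]
    have hlen : (bits.take m).length = m := by simp; omega
    rw [hlen, ih (by omega)]
    have henum : PySem.List.enumerate [bits[m]] ((0:Int) + (m:Nat)) = [(((m:Nat):Int), bits[m])] := by
      simp [PySem.List.enumerate_cons, PySem.List.enumerate_nil]
    rw [henum]
    simp only [List.foldl_cons, List.foldl_nil]
    set l := L.toNat with hldef
    have hLl : ((l : Nat) : Int) = L := by omega
    by_cases hguard : ((m:Nat):Int) < NC * L
    · rw [if_pos hguard]
      -- contribution lands in chunk j = m / l at weight r = m % l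
      have hl0 : 0 < l := by omega
      obtain ⟨j, r, hjr, hrl, hfd, hmd⟩ :
          ∃ j r : Nat, j * l + r = m ∧ r < l ∧
            PySem.Int.floordiv ((m:Nat):Int) L = ((j:Nat):Int) ∧
            PySem.Int.mod ((m:Nat):Int) L = ((r:Nat):Int) :=
        ⟨m / l, m % l,
         by rw [Nat.mul_comm]; exact Nat.div_add_mod m l,
         Nat.mod_lt m hl0,
         by rw [← hLl]; exact_mod_cast PySem.Int.floordiv_natCast m l,
         by rw [← hLl]; exact_mod_cast PySem.Int.mod_natCast m l⟩
      have hNCpos : 0 < NC := by nlinarith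
      have hmN : m < NC.toNat * l := by
        have h1 : ((m:Nat):Int) < ((NC.toNat : Nat) : Int) * ((l : Nat) : Int) := by
          rw [show (((NC.toNat : Nat)) : Int) = NC from by omega, hLl]
          exact hguard
        exact_mod_cast h1
      have hjN : j < NC.toNat := by
        have h1 : j * l < NC.toNat * l := by omega
        exact Nat.lt_of_mul_lt_mul_right h1
      rw [hfd, hmd]
      have htn : (((j:Nat):Int)).toNat = j := by omega
      have hrn : (((r:Nat):Int)).toNat = r := by omega
      rw [htn, hrn]
      -- the old value in slot j
      have hjlen : j < ((List.range NC.toNat).map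
          (fun j => lsbVal (((bits.take m).drop (j * l)).take l))).length := by
        simp [hjN]
      have hgd : ((List.range NC.toNat).map
            (fun j => lsbVal (((bits.take m).drop (j * l)).take l))).getD j 0
          = lsbVal (((bits.take m).drop (j * l)).take l) := by
        rw [List.getD_eq_getElem _ _ hjlen]
        simp
      rw [hgd]
      apply List.ext_getElem
      · simp
      · intro k h1 h2
        rw [List.getElem_set]
        simp only [List.getElem_map, List.getElem_range]
        have hkN : k < NC.toNat := by simpa using h2
        by_cases hkj : j = k
        · subst hkj
          rw [if_pos rfl]
          -- new chunk j = old chunk j ++ [bits[m]]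
          have hold : ((bits.take m).drop (j * l)).take l
              = (bits.drop (j * l)).take r := by
            rw [List.drop_take, List.take_take]
            congr 1
            omega
          have hnew : (((bits.take m ++ [bits[m]]).drop (j * l))).take l
              = (bits.drop (j * l)).take (r + 1) := by
            rw [← htake, List.drop_take, List.take_take]
            congr 1
            omega
          rw [hold, hnew]
          have hrlen : r < (bits.drop (j * l)).length := by
            simp [List.length_drop]; omega
          rw [List.take_add_one, List.getElem?_eq_getElem hrlen]
          simp only [Option.toList_some]
          rw [lsbVal_append_singleton]
          have hget : (bits.drop (j * l))[r] = bits[m]'hmlt := by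
            rw [List.getElem_drop]
            simp only [hjr]
          have hlt : (List.take r (bits.drop (j * l))).length = r := by
            simp [List.length_take]; omega
          rw [hget, hlt]
          ring
        · rw [if_neg hkj]
          -- other chunks unchanged
          rw [← htake, List.drop_take, List.drop_take, List.take_take, List.take_take]
          have hc : min l (m + 1 - k * l) = min l (m - k * l) := by
            rcases Nat.lt_or_ge k j with hlt2 | hge2
            · have h1 : (k + 1) * l ≤ j * l := Nat.mul_le_mul (by omega) (le_refl l)
              have h2 : (k + 1) * l = k * l + l := by ring
              omega
            · have hkj' : j < k := by omega
              have h1 : (j + 1) * l ≤ k * l := Nat.mul_le_mul (by omega) (le_refl l)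
              have h2 : (j + 1) * l = j * l + l := by ring
              omega
          rw [hc]
    · rw [if_neg hguard]
      -- bit m is beyond the kept chunks: nothing changes
      apply List.map_congr_left
      intro k hk
      have hkN : k < NC.toNat := List.mem_range.1 hk
      rw [← htake, List.drop_take, List.drop_take, List.take_take, List.take_take]
      have hNCl : NC.toNat * l ≤ m := by
        rcases (by omega : (0:Int) ≤ NC ∨ NC < 0) with h0 | h0
        · have h1 : ((NC.toNat : Nat) : Int) * ((l : Nat) : Int) ≤ ((m:Nat):Int) := by
            rw [show (((NC.toNat : Nat)) : Int) = NC from by omega, hLl]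
            omega
          exact_mod_cast h1
        · simp [Int.toNat_of_nonpos (le_of_lt h0)]
      have h1 : (k + 1) * l ≤ NC.toNat * l := Nat.mul_le_mul (by omega) (le_refl l)
      have h2 : (k + 1) * l = k * l + l := by ring
      have hc : min l (m + 1 - k * l) = min l (m - k * l) := by omega
      rw [hc]

-- ===== VERDICT (by name: the statement is the Claim_ definition above) =====
theorem Int_generator_spec : Claim_equal_Int_generator := by
  intro bits Levels _ hpre
  unfold Spec_Int_generator
  rcases lt_trichotomy Levels 0 with hneg | hzero | hpos
  · -- Levels < 0: both return []
    have hN : pvRoundDiv (bits.length : Int) Levels ≤ 0 :=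
      roundDiv_nonpos (bits.length : Int) Levels (by positivity) hneg
    unfold Int_generator Int_generator_alt
    rw [PySem.List.pyRange_one_eq_nil (by omega)]
    simp [hN]
  · exact absurd hzero hpre
  · set NC := pvRoundDiv (bits.length : Int) Levels with hNC
    have hN0 : 0 ≤ NC := roundDiv_nonneg (bits.length : Int) Levels (by positivity) hpos
    rw [A_eq_chunks bits Levels hpos]
    by_cases hz : NC ≤ 0
    · -- zero chunks on both sides
      have : NC = 0 := by omega
      unfold Int_generator_alt
      rw [← hNC]
      simp [chunksOf, this]
    · unfold Int_generator_alt
      rw [← hNC]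
      rw [if_neg hz]
      have := scatter_inv bits Levels NC hpos bits.length (le_refl _)
      rw [List.take_length] at this
      rw [this]
      rfl
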